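-- pv_equiv track=rewrite | github.com/mmlac/fieldnotes | worker/worker/cli/migrate.py | rewrite_source_id
-- ===== SOURCE A (Python) =====
-- _OLD_PREFIXES: tuple[str, ...] = (
--     "gmail://thread/",
--     "gmail://message/",
--     "google-calendar://event/",
--     "google-calendar://series/",
-- )
--
-- def rewrite_source_id(old_sid: str, account: str) -> str | None:
--     """Return the new-shape source_id for *old_sid*, or *None* if it
--     doesn't match a legacy prefix.
--
--     Examples:
--       ``gmail://thread/abc`` → ``gmail://<account>/thread/abc``
--       ``google-calendar://event/X/attendee/3`` →
--       ``google-calendar://<account>/event/X/attendee/3``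
--     """
--     for prefix in _OLD_PREFIXES:
--         if old_sid.startswith(prefix):
--             scheme, rest = prefix.split("://", 1)
--             kind = rest.rstrip("/")  # 'thread', 'message', 'event', 'series'
--             tail = old_sid[len(prefix):]
--             return f"{scheme}://{account}/{kind}/{tail}"
--     return None
-- ===== SOURCE B (Python) =====
-- _VALID_PAIRS = {
--     ("gmail", "thread"),
--     ("gmail", "message"),
--     ("google-calendar", "event"),
--     ("google-calendar", "series"),
-- }
--
-- def rewrite_source_id(old_sid: str, account: str) -> str | None:
--     scheme, sep, rest = old_sid.partition("://")
--     kind, slash, tail = rest.partition("/")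
--     if sep and slash and (scheme, kind) in _VALID_PAIRS:
--         return f"{scheme}://{account}/{kind}/{tail}"
--     return None
-- ===== Notes on version B (the rewrite author's own statement) =====
-- stated objective: idiomatic
-- what changed: Replaces the loop over four legacy prefixes with startswith by a single parse: partition on '://' and '/' plus one membership test of the (scheme, kind) pair in a set.
import Mathlib
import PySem

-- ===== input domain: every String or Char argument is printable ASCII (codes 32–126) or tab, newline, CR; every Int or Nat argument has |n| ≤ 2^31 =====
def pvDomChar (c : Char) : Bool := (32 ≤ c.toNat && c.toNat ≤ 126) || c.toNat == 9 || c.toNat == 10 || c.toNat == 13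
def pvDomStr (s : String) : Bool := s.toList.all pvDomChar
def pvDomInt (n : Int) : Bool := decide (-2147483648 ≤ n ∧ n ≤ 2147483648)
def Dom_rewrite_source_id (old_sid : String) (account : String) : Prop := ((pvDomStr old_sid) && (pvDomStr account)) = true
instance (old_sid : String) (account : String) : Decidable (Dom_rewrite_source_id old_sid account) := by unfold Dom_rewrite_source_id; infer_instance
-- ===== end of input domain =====

-- B replaces A's loop over four legacy prefixes by a single partition-based parse plus one
-- membership test of the (scheme, kind) pair (idiomatic decomposition; same cost).

-- ===== PORT A =====
def pvOldPrefixes : List String :=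
  ["gmail://thread/", "gmail://message/", "google-calendar://event/", "google-calendar://series/"]

-- hand port of rest.rstrip("/"): drop trailing '/' characters (exact: rstrip with an explicit char set)
def pvRstripSlash (s : String) : String :=
  String.ofList ((s.toList.reverse.dropWhile (fun c => c == '/')).reverse)

def pvLoopA (old_sid : String) (account : String) : List String → Option String
  | [] => none
  | pfx :: ps =>
    if PySem.Str.startswith old_sid pfx then
      -- scheme, rest = prefix.split("://", 1); unpacking never fails for these prefixes (guard is totalization only)
      match PySem.Str.splitMax? pfx "://" 1 with
      | some [scheme, rest] =>
        let kind := pvRstripSlash rest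
        let tail := PySem.Str.slice old_sid (some (PySem.Str.len pfx)) none
        some (scheme ++ "://" ++ account ++ "/" ++ kind ++ "/" ++ tail)
      | _ => none
    else pvLoopA old_sid account ps

def rewrite_source_id (old_sid : String) (account : String) : Option String :=
  pvLoopA old_sid account pvOldPrefixes

-- ===== PORT B =====
-- Python str.partition on char lists: split at the FIRST occurrence of sep; none = sep absent
def pvPartition (sep : List Char) : List Char → Option (List Char × List Char)
  | [] => none
  | c :: rest =>
    if List.isPrefixOf sep (c :: rest) then some ([], (c :: rest).drop sep.length)
    else
      match pvPartition sep rest with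
      | none => none
      | some (p, q) => some (c :: p, q)

def pvValidPairs : List (String × String) :=
  [("gmail", "thread"), ("gmail", "message"), ("google-calendar", "event"), ("google-calendar", "series")]

def rewrite_source_id_alt (old_sid : String) (account : String) : Option String :=
  match pvPartition "://".toList old_sid.toList with
  | none => none
  | some (schemeL, rest) =>
    match pvPartition "/".toList rest with
    | none => none
    | some (kindL, tailL) =>
      let scheme := String.ofList schemeL
      let kind := String.ofList kindL
      if (scheme, kind) ∈ pvValidPairs then
        some (scheme ++ "://" ++ account ++ "/" ++ kind ++ "/" ++ String.ofList tailL)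
      else none

-- ===== PRECONDITION & SPEC =====
def Spec_rewrite_source_id (old_sid : String) (account : String) (out : Option String) : Prop := out = rewrite_source_id_alt old_sid account
instance (old_sid : String) (account : String) (out : Option String) : Decidable (Spec_rewrite_source_id old_sid account out) := by unfold Spec_rewrite_source_id; infer_instance

-- ===== CLAIM (what is proved, stated in full; the proofs are below) =====
def Claim_equal_rewrite_source_id : Prop := ∀ (old_sid : String) (account : String), Dom_rewrite_source_id old_sid account → Spec_rewrite_source_id old_sid account (rewrite_source_id old_sid account)

-- ===== LEMMAS AND PROOFS =====

theorem pvPartition_sound (sep : List Char) : ∀ (cs p q : List Char),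
    pvPartition sep cs = some (p, q) → cs = p ++ sep ++ q := by
  intro cs
  induction cs with
  | nil => intro p q h; simp [pvPartition] at h
  | cons c rest ih =>
    intro p q h
    unfold pvPartition at h
    split at h
    · next hpre =>
      obtain ⟨u, hu⟩ := List.isPrefixOf_iff_prefix.mp hpre
      simp only [Option.some.injEq, Prod.mk.injEq] at h
      obtain ⟨hp, hq⟩ := h
      subst hp hq
      simp [← hu, List.drop_left' rfl]
    · next hpre =>
      cases hrec : pvPartition sep rest with
      | none => rw [hrec] at h; simp at h
      | some pq =>
        obtain ⟨p', q'⟩ := pq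
        rw [hrec] at h
        simp only [Option.some.injEq, Prod.mk.injEq] at h
        obtain ⟨hp, hq⟩ := h
        subst hq
        rw [← hp]
        simpa using ih p' q' hrec

theorem alt_none (s a : String)
    (h : ∀ pfx ∈ pvOldPrefixes, ¬ (pfx.toList <+: s.toList)) :
    rewrite_source_id_alt s a = none := by
  unfold rewrite_source_id_alt
  cases hp1 : pvPartition "://".toList s.toList with
  | none => rfl
  | some sr =>
    obtain ⟨schemeL, rest⟩ := sr
    dsimp only
    cases hp2 : pvPartition "/".toList rest with
    | none => rfl
    | some kt =>
      obtain ⟨kindL, tailL⟩ := kt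
      dsimp only
      split
      · next hmem =>
        exfalso
        have hs := pvPartition_sound _ _ _ _ hp1
        have hr := pvPartition_sound _ _ _ _ hp2
        rw [hr] at hs
        simp only [pvValidPairs, List.mem_cons, Prod.mk.injEq,
          List.not_mem_nil, or_false] at hmem
        have inj : ∀ (l : List Char) (w : String), String.ofList l = w → l = w.toList := by
          intro l w hw; rw [← hw]; simp
        rcases hmem with ⟨h1, h2⟩ | ⟨h1, h2⟩ | ⟨h1, h2⟩ | ⟨h1, h2⟩ <;>
          [ exact h "gmail://thread/" (by simp [pvOldPrefixes]) (by rw [hs, inj _ _ h1, inj _ _ h2]; exact ⟨tailL, by simp⟩)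
          ; exact h "gmail://message/" (by simp [pvOldPrefixes]) (by rw [hs, inj _ _ h1, inj _ _ h2]; exact ⟨tailL, by simp⟩)
          ; exact h "google-calendar://event/" (by simp [pvOldPrefixes]) (by rw [hs, inj _ _ h1, inj _ _ h2]; exact ⟨tailL, by simp⟩)
          ; exact h "google-calendar://series/" (by simp [pvOldPrefixes]) (by rw [hs, inj _ _ h1, inj _ _ h2]; exact ⟨tailL, by simp⟩) ]
      · rfl

theorem case_thread (s a : String) (t : List Char) (ht : "gmail://thread/".toList ++ t = s.toList) :
    rewrite_source_id s a = rewrite_source_id_alt s a := by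
  have hB : rewrite_source_id_alt s a = some ("gmail" ++ "://" ++ a ++ "/" ++ "thread" ++ "/" ++ String.ofList t) := by
    unfold rewrite_source_id_alt
    rw [← ht]
    simp [pvPartition, List.isPrefixOf, pvValidPairs]
  have e1 : PySem.Str.startswith s "gmail://thread/" = true := by
    rw [PySem.Str.startswith_eq, ← ht]; simp [PySem.Chars.startswith, List.isPrefixOf]
  have htail : PySem.Str.slice s (some (PySem.Str.len "gmail://thread/")) none = String.ofList t := by
    have hl : PySem.Str.len "gmail://thread/" = (15 : Int) := by decide
    refine String.toList_inj.mp ?_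
    rw [hl, PySem.Str.toList_slice, PySem.Chars.slice_eq_listSlice,
      PySem.List.slice_from _ (by norm_num), ← ht]
    simp
  have hsp : PySem.Str.splitMax? "gmail://thread/" "://" 1 = some ["gmail", "thread/"] := by decide
  have hk : pvRstripSlash "thread/" = "thread" := by decide
  unfold rewrite_source_id pvOldPrefixes
  simp only [pvLoopA, e1, if_true, hsp, hk, htail, hB]

theorem case_message (s a : String) (t : List Char) (ht : "gmail://message/".toList ++ t = s.toList) :
    rewrite_source_id s a = rewrite_source_id_alt s a := by
  have hB : rewrite_source_id_alt s a = some ("gmail" ++ "://" ++ a ++ "/" ++ "message" ++ "/" ++ String.ofList t) := by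
    unfold rewrite_source_id_alt
    rw [← ht]
    simp [pvPartition, List.isPrefixOf, pvValidPairs]
  have e1 : PySem.Str.startswith s "gmail://thread/" = false := by
    rw [PySem.Str.startswith_eq, ← ht]; simp [PySem.Chars.startswith, List.isPrefixOf]
  have e2 : PySem.Str.startswith s "gmail://message/" = true := by
    rw [PySem.Str.startswith_eq, ← ht]; simp [PySem.Chars.startswith, List.isPrefixOf]
  have htail : PySem.Str.slice s (some (PySem.Str.len "gmail://message/")) none = String.ofList t := by
    have hl : PySem.Str.len "gmail://message/" = (16 : Int) := by decide
    refine String.toList_inj.mp ?_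
    rw [hl, PySem.Str.toList_slice, PySem.Chars.slice_eq_listSlice,
      PySem.List.slice_from _ (by norm_num), ← ht]
    simp
  have hsp : PySem.Str.splitMax? "gmail://message/" "://" 1 = some ["gmail", "message/"] := by decide
  have hk : pvRstripSlash "message/" = "message" := by decide
  unfold rewrite_source_id pvOldPrefixes
  simp only [pvLoopA, e1, e2, Bool.false_eq_true, if_false, if_true, hsp, hk, htail, hB]

theorem case_event (s a : String) (t : List Char) (ht : "google-calendar://event/".toList ++ t = s.toList) :
    rewrite_source_id s a = rewrite_source_id_alt s a := by
  have hB : rewrite_source_id_alt s a = some ("google-calendar" ++ "://" ++ a ++ "/" ++ "event" ++ "/" ++ String.ofList t) := by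
    unfold rewrite_source_id_alt
    rw [← ht]
    simp [pvPartition, List.isPrefixOf, pvValidPairs]
  have e1 : PySem.Str.startswith s "gmail://thread/" = false := by
    rw [PySem.Str.startswith_eq, ← ht]; simp [PySem.Chars.startswith, List.isPrefixOf]
  have e2 : PySem.Str.startswith s "gmail://message/" = false := by
    rw [PySem.Str.startswith_eq, ← ht]; simp [PySem.Chars.startswith, List.isPrefixOf]
  have e3 : PySem.Str.startswith s "google-calendar://event/" = true := by
    rw [PySem.Str.startswith_eq, ← ht]; simp [PySem.Chars.startswith, List.isPrefixOf]
  have htail : PySem.Str.slice s (some (PySem.Str.len "google-calendar://event/")) none = String.ofList t := by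
    have hl : PySem.Str.len "google-calendar://event/" = (24 : Int) := by decide
    refine String.toList_inj.mp ?_
    rw [hl, PySem.Str.toList_slice, PySem.Chars.slice_eq_listSlice,
      PySem.List.slice_from _ (by norm_num), ← ht]
    simp
  have hsp : PySem.Str.splitMax? "google-calendar://event/" "://" 1 = some ["google-calendar", "event/"] := by decide
  have hk : pvRstripSlash "event/" = "event" := by decide
  unfold rewrite_source_id pvOldPrefixes
  simp only [pvLoopA, e1, e2, e3, Bool.false_eq_true, if_false, if_true, hsp, hk, htail, hB]

theorem case_series (s a : String) (t : List Char) (ht : "google-calendar://series/".toList ++ t = s.toList) :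
    rewrite_source_id s a = rewrite_source_id_alt s a := by
  have hB : rewrite_source_id_alt s a = some ("google-calendar" ++ "://" ++ a ++ "/" ++ "series" ++ "/" ++ String.ofList t) := by
    unfold rewrite_source_id_alt
    rw [← ht]
    simp [pvPartition, List.isPrefixOf, pvValidPairs]
  have e1 : PySem.Str.startswith s "gmail://thread/" = false := by
    rw [PySem.Str.startswith_eq, ← ht]; simp [PySem.Chars.startswith, List.isPrefixOf]
  have e2 : PySem.Str.startswith s "gmail://message/" = false := by
    rw [PySem.Str.startswith_eq, ← ht]; simp [PySem.Chars.startswith, List.isPrefixOf]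
  have e3 : PySem.Str.startswith s "google-calendar://event/" = false := by
    rw [PySem.Str.startswith_eq, ← ht]; simp [PySem.Chars.startswith, List.isPrefixOf]
  have e4 : PySem.Str.startswith s "google-calendar://series/" = true := by
    rw [PySem.Str.startswith_eq, ← ht]; simp [PySem.Chars.startswith, List.isPrefixOf]
  have htail : PySem.Str.slice s (some (PySem.Str.len "google-calendar://series/")) none = String.ofList t := by
    have hl : PySem.Str.len "google-calendar://series/" = (25 : Int) := by decide
    refine String.toList_inj.mp ?_
    rw [hl, PySem.Str.toList_slice, PySem.Chars.slice_eq_listSlice,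
      PySem.List.slice_from _ (by norm_num), ← ht]
    simp
  have hsp : PySem.Str.splitMax? "google-calendar://series/" "://" 1 = some ["google-calendar", "series/"] := by decide
  have hk : pvRstripSlash "series/" = "series" := by decide
  unfold rewrite_source_id pvOldPrefixes
  simp only [pvLoopA, e1, e2, e3, e4, Bool.false_eq_true, if_false, if_true, hsp, hk, htail, hB]

-- ===== VERDICT (by name: the statement is the Claim_ definition above) =====
theorem rewrite_source_id_spec : Claim_equal_rewrite_source_id := by
  intro s a _
  unfold Spec_rewrite_source_id
  by_cases c1 : "gmail://thread/".toList <+: s.toList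
  · obtain ⟨t, ht⟩ := c1; exact case_thread s a t ht
  by_cases c2 : "gmail://message/".toList <+: s.toList
  · obtain ⟨t, ht⟩ := c2; exact case_message s a t ht
  by_cases c3 : "google-calendar://event/".toList <+: s.toList
  · obtain ⟨t, ht⟩ := c3; exact case_event s a t ht
  by_cases c4 : "google-calendar://series/".toList <+: s.toList
  · obtain ⟨t, ht⟩ := c4; exact case_series s a t ht
  have eA : rewrite_source_id s a = none := by
    have e1 : PySem.Str.startswith s "gmail://thread/" = false := by
      rw [PySem.Str.startswith_eq]
      exact Bool.eq_false_iff.mpr (fun hb => c1 ((PySem.Chars.startswith_iff _ _).mp hb))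
    have e2 : PySem.Str.startswith s "gmail://message/" = false := by
      rw [PySem.Str.startswith_eq]
      exact Bool.eq_false_iff.mpr (fun hb => c2 ((PySem.Chars.startswith_iff _ _).mp hb))
    have e3 : PySem.Str.startswith s "google-calendar://event/" = false := by
      rw [PySem.Str.startswith_eq]
      exact Bool.eq_false_iff.mpr (fun hb => c3 ((PySem.Chars.startswith_iff _ _).mp hb))
    have e4 : PySem.Str.startswith s "google-calendar://series/" = false := by
      rw [PySem.Str.startswith_eq]
      exact Bool.eq_false_iff.mpr (fun hb => c4 ((PySem.Chars.startswith_iff _ _).mp hb))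
    unfold rewrite_source_id pvOldPrefixes
    simp only [pvLoopA, e1, e2, e3, e4, Bool.false_eq_true, if_false]
  have eB : rewrite_source_id_alt s a = none := by
    refine alt_none s a ?_
    intro pfx hp
    simp only [pvOldPrefixes, List.mem_cons, List.not_mem_nil, or_false] at hp
    rcases hp with rfl | rfl | rfl | rfl
    · exact c1
    · exact c2
    · exact c3
    · exact c4
  rw [eA, eB]
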